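-- pv_equiv track=rewrite | github.com/lambautroi/rebuild-book | utils/source_archive.py | auto_tag
-- ===== SOURCE A (Python) =====
-- def auto_tag(title: str, author: str) -> list:
--     """Gắn tag đơn giản dựa trên tiêu đề hoặc tác giả"""
--     tags = []
--     title_lower = title.lower()
--     if any(k in title_lower for k in ["history", "philosophy", "essay"]):
--         tags.append("philosophy")
--     if any(k in title_lower for k in ["novel", "classic", "literature"]):
--         tags.append("classic")
--     if any(k in title_lower for k in ["story", "tale", "fiction"]):
--         tags.append("fiction")
--     if not tags:
--         tags.append("general")
--     return tags
-- ===== SOURCE B (Python) =====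
-- KEYWORD_TAG = {
--     "history": "philosophy", "philosophy": "philosophy", "essay": "philosophy",
--     "novel": "classic", "classic": "classic", "literature": "classic",
--     "story": "fiction", "tale": "fiction", "fiction": "fiction",
-- }
--
-- TAG_ORDER = ["philosophy", "classic", "fiction"]
--
--
-- def auto_tag(title: str, author: str) -> list:
--     """Single scan over the title: at each position, match keywords of a
--     keyword->tag map and collect the tags found; emit in canonical order."""
--     t = title.lower()
--     found = set()
--     for i in range(len(t)):
--         for kw, tag in KEYWORD_TAG.items():
--             if t.startswith(kw, i):
--                 found.add(tag)
--     tags = [tag for tag in TAG_ORDER if tag in found]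
--     return tags or ["general"]
-- ===== Notes on version B (the rewrite author's own statement) =====
-- stated objective: alternative
-- what changed: Instead of A's three unrolled any-substring branch tests, B makes one positional scan of the lowered title matching a keyword-to-tag map at each index, accumulates matched tags in a set, and emits them in a canonical tag order with the 'general' fallback.
import Mathlib
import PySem

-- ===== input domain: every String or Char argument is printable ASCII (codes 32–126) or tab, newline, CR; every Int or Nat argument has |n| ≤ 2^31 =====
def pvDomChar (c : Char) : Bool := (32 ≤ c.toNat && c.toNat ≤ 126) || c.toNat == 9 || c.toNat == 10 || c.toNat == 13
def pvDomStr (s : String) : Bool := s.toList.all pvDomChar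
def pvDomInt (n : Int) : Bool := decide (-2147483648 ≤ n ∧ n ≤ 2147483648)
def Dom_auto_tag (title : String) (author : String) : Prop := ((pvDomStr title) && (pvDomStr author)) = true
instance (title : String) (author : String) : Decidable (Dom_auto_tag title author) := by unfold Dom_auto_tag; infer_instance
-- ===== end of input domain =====

-- B replaces A's three any-substring branch tests by one positional scan of the title against a keyword→tag map, collecting tags into a set; objective: alternative.

-- ===== PORT A =====
def auto_tag (title : String) (author : String) : List String :=
  let tags : List String := []
  let title_lower := PySem.Str.lower title
  let tags := if ["history", "philosophy", "essay"].any (fun k => PySem.Str.isIn k title_lower)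
              then tags ++ ["philosophy"] else tags
  let tags := if ["novel", "classic", "literature"].any (fun k => PySem.Str.isIn k title_lower)
              then tags ++ ["classic"] else tags
  let tags := if ["story", "tale", "fiction"].any (fun k => PySem.Str.isIn k title_lower)
              then tags ++ ["fiction"] else tags
  if tags = [] then tags ++ ["general"] else tags

-- ===== PORT B =====
def kwTagTable : List (String × String) :=
  [("history", "philosophy"), ("philosophy", "philosophy"), ("essay", "philosophy"),
   ("novel", "classic"), ("classic", "classic"), ("literature", "classic"),
   ("story", "fiction"), ("tale", "fiction"), ("fiction", "fiction")]

def tagOrder : List String := ["philosophy", "classic", "fiction"]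

-- t.startswith(kw, i) with 0 ≤ i ≤ len(t) is exactly Chars.startswith on (toList t).drop i
def auto_tag_alt (title : String) (author : String) : List String :=
  let tl := (PySem.Str.lower title).toList
  let found : PySem.Set String :=
    (List.range tl.length).foldl
      (fun f i => kwTagTable.foldl
        (fun f p => if PySem.Chars.startswith (tl.drop i) p.1.toList
                    then PySem.Set.add f p.2 else f) f)
      PySem.Set.empty
  let tags := tagOrder.filter (fun tag => PySem.Set.contains found tag)
  if tags = [] then ["general"] else tags

-- ===== PRECONDITION & SPEC =====
def Spec_auto_tag (title : String) (author : String) (out : List String) : Prop := out = auto_tag_alt title author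
instance (title : String) (author : String) (out : List String) : Decidable (Spec_auto_tag title author out) := by unfold Spec_auto_tag; infer_instance

-- ===== CLAIM =====
def Claim_equal_auto_tag : Prop := ∀ (title : String) (author : String), Dom_auto_tag title author → Spec_auto_tag title author (auto_tag title author)

-- ===== LEMMAS AND PROOFS =====

-- inner loop over the keyword table: membership characterisation
theorem mem_inner (tl : List Char) (i : Nat) (tbl : List (String × String))
    (f : PySem.Set String) (x : String) :
    (x ∈ tbl.foldl
      (fun f p => if PySem.Chars.startswith (tl.drop i) p.1.toList
                  then PySem.Set.add f p.2 else f) f)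
    ↔ x ∈ f ∨ ∃ p ∈ tbl, p.2 = x ∧ PySem.Chars.startswith (tl.drop i) p.1.toList = true := by
  induction tbl generalizing f with
  | nil => simp
  | cons p ps ih =>
    simp only [List.foldl_cons, List.mem_cons]
    by_cases h : PySem.Chars.startswith (tl.drop i) p.1.toList = true
    · rw [if_pos h, ih]
      simp only [PySem.Set.mem_add]
      constructor
      · rintro (⟨hf | he⟩ | ⟨q, hq, h2, hs⟩)
        · exact Or.inl hf
        · exact Or.inr ⟨p, Or.inl rfl, he.symm, h⟩
        · exact Or.inr ⟨q, Or.inr hq, h2, hs⟩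
      · rintro (hf | ⟨q, hq | hq, h2, hs⟩)
        · exact Or.inl (Or.inl hf)
        · exact Or.inl (Or.inr (hq ▸ h2.symm))
        · exact Or.inr ⟨q, hq, h2, hs⟩
    · rw [if_neg h, ih]
      constructor
      · rintro (hf | ⟨q, hq, h2, hs⟩)
        · exact Or.inl hf
        · exact Or.inr ⟨q, Or.inr hq, h2, hs⟩
      · rintro (hf | ⟨q, hq | hq, h2, hs⟩)
        · exact Or.inl hf
        · exact absurd (hq ▸ hs) h
        · exact Or.inr ⟨q, hq, h2, hs⟩

-- outer loop over positions
theorem mem_outer (tl : List Char) (n : Nat) (f : PySem.Set String) (x : String) :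
    (x ∈ (List.range n).foldl
      (fun f i => kwTagTable.foldl
        (fun f p => if PySem.Chars.startswith (tl.drop i) p.1.toList
                    then PySem.Set.add f p.2 else f) f) f)
    ↔ x ∈ f ∨ ∃ i < n, ∃ p ∈ kwTagTable, p.2 = x ∧
        PySem.Chars.startswith (tl.drop i) p.1.toList = true := by
  induction n generalizing f with
  | zero => simp
  | succ n ih =>
    rw [List.range_succ, List.foldl_append, List.foldl_cons, List.foldl_nil, mem_inner, ih]
    constructor
    · rintro (⟨hf | ⟨i, hi, hp⟩⟩ | ⟨p, hp, h2, hs⟩)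
      · exact Or.inl hf
      · exact Or.inr ⟨i, Nat.lt_succ_of_lt hi, hp⟩
      · exact Or.inr ⟨n, Nat.lt_succ_self n, p, hp, h2, hs⟩
    · rintro (hf | ⟨i, hi, hp⟩)
      · exact Or.inl (Or.inl hf)
      · rcases Nat.lt_succ_iff_lt_or_eq.mp hi with hlt | rfl
        · exact Or.inl (Or.inr ⟨i, hlt, hp⟩)
        · obtain ⟨p, hp, h2, hs⟩ := hp
          exact Or.inr ⟨p, hp, h2, hs⟩

theorem mem_found (tl : List Char) (x : String) :
    (x ∈ (List.range tl.length).foldl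
      (fun f i => kwTagTable.foldl
        (fun f p => if PySem.Chars.startswith (tl.drop i) p.1.toList
                    then PySem.Set.add f p.2 else f) f) PySem.Set.empty)
    ↔ ∃ p ∈ kwTagTable, p.2 = x ∧ PySem.Chars.isIn p.1.toList tl = true := by
  rw [mem_outer]
  have hne : ∀ p ∈ kwTagTable, p.1.toList ≠ [] := by decide
  constructor
  · rintro (hf | ⟨i, _, p, hp, h2, hs⟩)
    · cases hf
    · refine ⟨p, hp, h2, ?_⟩
      rw [← PySem.Chars.exists_prefix_drop_iff_isIn]
      exact ⟨i, (PySem.Chars.startswith_iff _ _).mp hs⟩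
  · rintro ⟨p, hp, h2, hin⟩
    obtain ⟨j, hj⟩ := (PySem.Chars.exists_prefix_drop_iff_isIn _ _).mpr hin
    have hjlt : j < tl.length := by
      by_contra hge
      rw [List.drop_eq_nil_of_le (Nat.le_of_not_lt hge)] at hj
      exact hne p hp (List.prefix_nil.mp hj)
    exact Or.inr ⟨j, hjlt, p, hp, h2, (PySem.Chars.startswith_iff _ _).mpr hj⟩

-- contains of the found set, per tag, as A's Boolean conditions
theorem contains_found (title : String) (x : String)
    (ks : List String) (hks : ∀ k, (∃ p ∈ kwTagTable, p.2 = x ∧ p.1 = k) ↔ k ∈ ks) :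
    PySem.Set.contains
      ((List.range (PySem.Str.lower title).toList.length).foldl
        (fun f i => kwTagTable.foldl
          (fun f p => if PySem.Chars.startswith ((PySem.Str.lower title).toList.drop i) p.1.toList
                      then PySem.Set.add f p.2 else f) f) PySem.Set.empty) x
    = ks.any (fun k => PySem.Str.isIn k (PySem.Str.lower title)) := by
  rw [Bool.eq_iff_iff, PySem.Set.contains_iff, mem_found, List.any_eq_true]
  constructor
  · rintro ⟨p, hp, h2, hin⟩
    refine ⟨p.1, (hks p.1).mp ⟨p, hp, h2, rfl⟩, ?_⟩
    simpa using hin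
  · rintro ⟨k, hk, hin⟩
    obtain ⟨p, hp, h2, h1⟩ := (hks k).mpr hk
    refine ⟨p, hp, h2, ?_⟩
    rw [h1]; simpa using hin

theorem hks_phi : ∀ k, (∃ p ∈ kwTagTable, p.2 = "philosophy" ∧ p.1 = k) ↔ k ∈ ["history", "philosophy", "essay"] := by
  intro k; simp [kwTagTable]; tauto

theorem hks_cla : ∀ k, (∃ p ∈ kwTagTable, p.2 = "classic" ∧ p.1 = k) ↔ k ∈ ["novel", "classic", "literature"] := by
  intro k; simp [kwTagTable]; tauto

theorem hks_fic : ∀ k, (∃ p ∈ kwTagTable, p.2 = "fiction" ∧ p.1 = k) ↔ k ∈ ["story", "tale", "fiction"] := by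
  intro k; simp [kwTagTable]; tauto

-- ===== VERDICT =====
theorem auto_tag_spec : Claim_equal_auto_tag := by
  intro title author _
  unfold Spec_auto_tag auto_tag auto_tag_alt
  have h1 := contains_found title "philosophy" ["history", "philosophy", "essay"] hks_phi
  have h2 := contains_found title "classic" ["novel", "classic", "literature"] hks_cla
  have h3 := contains_found title "fiction" ["story", "tale", "fiction"] hks_fic
  simp only [tagOrder, List.filter, h1, h2, h3]
  cases hb1 : ["history", "philosophy", "essay"].any (fun k => PySem.Str.isIn k (PySem.Str.lower title)) <;>
  cases hb2 : ["novel", "classic", "literature"].any (fun k => PySem.Str.isIn k (PySem.Str.lower title)) <;>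
  cases hb3 : ["story", "tale", "fiction"].any (fun k => PySem.Str.isIn k (PySem.Str.lower title)) <;>
    simp only [hb1, hb2, hb3] <;> rfl
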